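-- pv_equiv track=rewrite | github.com/batkaevruslan/yandex_algorithm5.0 | homework1/F/F.py | getSignSequence
-- ===== SOURCE A (Python) =====
-- from collections import deque
-- from typing import List
--
-- def getSignSequence(nums: List[int]):
--     result = deque()
--     lastIndex = 0
--     while lastIndex < len(nums) and (nums[lastIndex] % 2) == 0:
--         result.append("+")
--         lastIndex += 1
--
--     lastIndex += 1
--     while lastIndex < len(nums) and (nums[lastIndex] % 2) == 1:
--         result.append("x")
--         lastIndex += 1
--
--     if lastIndex < len(nums):
--         result.append("+")
--         lastIndex += 1
--         while lastIndex < len(nums):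
--             result.append("x")
--             lastIndex += 1
--
--     return "".join(result)
-- ===== SOURCE B (Python) =====
-- def getSignSequence(nums):
--     n = len(nums)
--     # p = index of first odd element (n if none)
--     p = next((i for i, v in enumerate(nums) if v % 2 == 1), n)
--     if p == n:
--         return "+" * n
--     # q = index of first even element after p (n if none)
--     q = next((i for i in range(p + 1, n) if nums[i] % 2 == 0), n)
--     res = "+" * p + "x" * (q - p - 1)
--     if q < n:
--         res += "+" + "x" * (n - q - 1)
--     return res
-- ===== Notes on version B (the rewrite author's own statement) =====
-- stated objective: simpler
-- what changed: Replaces A's three incremental while-loops appending single chars to a deque by a compute-two-boundary-indices-then-build-with-string-multiplication decomposition.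
import Mathlib
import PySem

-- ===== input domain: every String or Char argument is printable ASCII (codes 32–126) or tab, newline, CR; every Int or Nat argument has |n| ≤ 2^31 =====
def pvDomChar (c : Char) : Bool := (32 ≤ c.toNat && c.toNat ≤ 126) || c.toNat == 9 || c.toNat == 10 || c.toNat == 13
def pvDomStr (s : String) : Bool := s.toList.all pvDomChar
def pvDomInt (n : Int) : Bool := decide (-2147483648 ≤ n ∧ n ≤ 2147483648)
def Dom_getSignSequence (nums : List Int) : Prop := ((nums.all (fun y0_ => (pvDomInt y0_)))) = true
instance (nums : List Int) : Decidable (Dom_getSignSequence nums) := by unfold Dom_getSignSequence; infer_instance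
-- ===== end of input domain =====

-- B replaces A's three incremental while-loops (appending one char at a time to a deque)
-- by computing the two boundary indices first and building the string from replicated blocks.

-- ===== PORT A =====
-- first while loop: append '+' while the current element is even
def loopA1 (nums : List Int) (i : Nat) (res : List Char) : List Char × Nat :=
  if h : i < nums.length ∧ PySem.Int.mod (nums.getD i 0) 2 = 0 then
    loopA1 nums (i + 1) (res ++ ['+'])
  else (res, i)
termination_by nums.length - i
decreasing_by omega

-- second while loop: append 'x' while the current element is odd
def loopA2 (nums : List Int) (i : Nat) (res : List Char) : List Char × Nat :=
  if h : i < nums.length ∧ PySem.Int.mod (nums.getD i 0) 2 = 1 then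
    loopA2 nums (i + 1) (res ++ ['x'])
  else (res, i)
termination_by nums.length - i
decreasing_by omega

-- final while loop: append 'x' until the end
def loopA3 (nums : List Int) (i : Nat) (res : List Char) : List Char :=
  if h : i < nums.length then loopA3 nums (i + 1) (res ++ ['x'])
  else res
termination_by nums.length - i
decreasing_by omega

def getSignSequence (nums : List Int) : String :=
  let r1 := loopA1 nums 0 []
  let lastIndex := r1.2 + 1
  let r2 := loopA2 nums lastIndex r1.1
  let res :=
    if r2.2 < nums.length then loopA3 nums (r2.2 + 1) (r2.1 ++ ['+'])
    else r2.1
  String.mk res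

-- ===== PORT B =====
def getSignSequence_alt (nums : List Int) : String :=
  let n := nums.length
  let p := nums.findIdx (fun v => PySem.Int.mod v 2 == 1)
  if p = n then String.mk (List.replicate n '+')
  else
    let q := p + 1 + (nums.drop (p + 1)).findIdx (fun v => PySem.Int.mod v 2 == 0)
    let res := List.replicate p '+' ++ List.replicate (q - p - 1) 'x'
    String.mk (if q < n then res ++ '+' :: List.replicate (n - q - 1) 'x' else res)

-- ===== PRECONDITION & SPEC =====
def Spec_getSignSequence (nums : List Int) (out : String) : Prop := out = getSignSequence_alt nums
instance (nums : List Int) (out : String) : Decidable (Spec_getSignSequence nums out) := by unfold Spec_getSignSequence; infer_instance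

-- ===== CLAIM (what is proved, stated in full; the proofs are below) =====
def Claim_equal_getSignSequence : Prop := ∀ (nums : List Int), Dom_getSignSequence nums → Spec_getSignSequence nums (getSignSequence nums)

-- ===== LEMMAS AND PROOFS =====

theorem mod2_ne_zero_iff (v : Int) : ¬ PySem.Int.mod v 2 = 0 ↔ PySem.Int.mod v 2 = 1 := by
  rcases PySem.Int.mod_two_eq v with h | h <;> simp [h]

theorem mod2_emod (v : Int) : PySem.Int.mod v 2 = v % 2 :=
  PySem.Int.mod_eq_emod_of_pos (by norm_num)

theorem cons_replicate (k : Nat) (c : Char) :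
    c :: List.replicate k c = List.replicate (1 + k) c := by
  rw [Nat.add_comm]; rfl

theorem loopA1_spec (nums : List Int) (i : Nat) (res : List Char) :
    loopA1 nums i res =
      (res ++ List.replicate ((nums.drop i).findIdx (fun v => PySem.Int.mod v 2 == 1)) '+',
       i + (nums.drop i).findIdx (fun v => PySem.Int.mod v 2 == 1)) := by
  fun_induction loopA1 nums i res with
  | case1 i res h ih =>
    have hd : nums.drop i = nums[i] :: nums.drop (i + 1) := List.drop_eq_getElem_cons h.1
    have hg : nums.getD i 0 = nums[i] := by
      simp [List.getD, List.getElem?_eq_getElem h.1]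
    have hm : nums[i] % 2 = 0 := by rw [← mod2_emod]; exact hg ▸ h.2
    rw [ih, hd, List.findIdx_cons]
    simp [mod2_emod, hm, cons_replicate]
    omega
  | case2 i res h =>
    by_cases hi : i < nums.length
    · have hg : nums.getD i 0 = nums[i] := by
        simp [List.getD, List.getElem?_eq_getElem hi]
      have hm : nums[i] % 2 = 1 := by
        rw [← mod2_emod]
        exact hg ▸ (mod2_ne_zero_iff (nums.getD i 0)).mp (fun hc => h ⟨hi, hc⟩)
      have hd : nums.drop i = nums[i] :: nums.drop (i + 1) := List.drop_eq_getElem_cons hi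
      rw [hd, List.findIdx_cons]
      simp [mod2_emod, hm]
    · have hd : nums.drop i = [] := List.drop_eq_nil_of_le (by omega)
      simp [hd]

theorem loopA2_spec (nums : List Int) (i : Nat) (res : List Char) :
    loopA2 nums i res =
      (res ++ List.replicate ((nums.drop i).findIdx (fun v => PySem.Int.mod v 2 == 0)) 'x',
       i + (nums.drop i).findIdx (fun v => PySem.Int.mod v 2 == 0)) := by
  fun_induction loopA2 nums i res with
  | case1 i res h ih =>
    have hd : nums.drop i = nums[i] :: nums.drop (i + 1) := List.drop_eq_getElem_cons h.1
    have hg : nums.getD i 0 = nums[i] := by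
      simp [List.getD, List.getElem?_eq_getElem h.1]
    have hm : nums[i] % 2 = 1 := by rw [← mod2_emod]; exact hg ▸ h.2
    rw [ih, hd, List.findIdx_cons]
    simp [mod2_emod, hm, cons_replicate]
    omega
  | case2 i res h =>
    by_cases hi : i < nums.length
    · have hg : nums.getD i 0 = nums[i] := by
        simp [List.getD, List.getElem?_eq_getElem hi]
      have hm : nums[i] % 2 = 0 := by
        rw [← mod2_emod]
        rcases PySem.Int.mod_two_eq nums[i] with h0 | h1
        · exact h0
        · exact absurd ⟨hi, hg ▸ h1⟩ h
      have hd : nums.drop i = nums[i] :: nums.drop (i + 1) := List.drop_eq_getElem_cons hi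
      rw [hd, List.findIdx_cons]
      simp [mod2_emod, hm]
    · have hd : nums.drop i = [] := List.drop_eq_nil_of_le (by omega)
      simp [hd]

theorem loopA3_spec (nums : List Int) (i : Nat) (res : List Char) :
    loopA3 nums i res = res ++ List.replicate (nums.length - i) 'x' := by
  fun_induction loopA3 nums i res with
  | case1 i res h ih =>
    have hk : nums.length - i = (nums.length - (i + 1)) + 1 := by omega
    rw [ih, hk]
    simp [List.replicate_succ]
  | case2 i res h =>
    have : nums.length - i = 0 := by omega
    simp [this]

-- ===== VERDICT (by name: the statement is the Claim_ definition above) =====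
theorem getSignSequence_spec : Claim_equal_getSignSequence := by
  intro nums _
  unfold Spec_getSignSequence getSignSequence getSignSequence_alt
  simp only [loopA1_spec, loopA2_spec, loopA3_spec, List.nil_append, Nat.zero_add,
    List.drop_zero]
  have hpn : nums.findIdx (fun v => PySem.Int.mod v 2 == 1) ≤ nums.length :=
    List.findIdx_le_length
  set p := nums.findIdx (fun v => PySem.Int.mod v 2 == 1) with hp
  set j := (nums.drop (p + 1)).findIdx (fun v => PySem.Int.mod v 2 == 0) with hj
  have hjl : j ≤ nums.length - (p + 1) := by
    have h := List.findIdx_le_length (p := fun v => PySem.Int.mod v 2 == 0)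
      (xs := nums.drop (p + 1))
    rw [List.length_drop] at h
    exact h
  by_cases hpe : p = nums.length
  · have hd : nums.drop (p + 1) = [] := List.drop_eq_nil_of_le (by omega)
    have hj0 : j = 0 := by rw [hj, hd, List.findIdx_nil]
    have hnq : ¬ (p + 1 + j < nums.length) := by omega
    rw [if_neg hnq, if_pos hpe, hj0, hpe]
    simp
  · have e1 : p + 1 + j - p - 1 = j := by omega
    rw [if_neg hpe, e1]
    by_cases hq : p + 1 + j < nums.length
    · have e2 : nums.length - (p + 1 + j + 1) = nums.length - (p + 1 + j) - 1 := by omega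
      rw [if_pos hq, if_pos hq, e2]
      simp [List.append_assoc]
    · rw [if_neg hq, if_neg hq]
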